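-- pv_equiv track=rewrite | github.com/julianschambeck/convex-hull | convex_hull.py | find_p_0
-- ===== SOURCE A (Python) =====
-- def find_p_0(points):
--     """
--     Finds the starting point for the convex hull.
--     """
--     p_0 = points[0]
--
--     # Find the point with the lowest y coordinate.
--     for i in range(1, len(points)):
--         if points[i][1] < p_0[1]:
--             p_0 = points[i]
--         # If y coordinates of two points are the same, choose the
--         # point with the lower x coordinate.
--         elif points[i][1] == p_0[1] and points[i][0] < p_0[0]:
--             p_0 = points[i]
--
--     return p_0
-- ===== SOURCE B (Python) =====
-- def find_p_0(points):
--     """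
--     Finds the starting point for the convex hull.
--     """
--     return sorted(points, key=lambda p: (p[1], p[0]))[0]
-- ===== Notes on version B (the rewrite author's own statement) =====
-- stated objective: alternative
-- what changed: Replaces the explicit index-based min-scan with a stable lexicographic sort by (y, x) followed by taking the first element.
import Mathlib
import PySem

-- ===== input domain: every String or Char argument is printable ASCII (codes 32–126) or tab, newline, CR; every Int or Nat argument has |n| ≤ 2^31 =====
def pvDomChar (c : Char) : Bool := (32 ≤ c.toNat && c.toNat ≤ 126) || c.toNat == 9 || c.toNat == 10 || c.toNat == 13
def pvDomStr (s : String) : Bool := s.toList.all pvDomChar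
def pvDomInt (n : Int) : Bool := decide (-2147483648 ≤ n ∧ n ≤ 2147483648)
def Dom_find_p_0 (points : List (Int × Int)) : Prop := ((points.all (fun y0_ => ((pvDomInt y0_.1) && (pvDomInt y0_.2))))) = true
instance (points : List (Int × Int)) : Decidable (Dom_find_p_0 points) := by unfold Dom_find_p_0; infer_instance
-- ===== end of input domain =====

-- B replaces A's index-based minimum scan by a stable sort on the key (y, x) followed by
-- taking the first element (same return value; no speedup claimed).

-- ===== PORT A =====
-- Literal port of A: p_0 = points[0]; for i in range(1, len(points)): compare and update.
def find_p_0 (points : List (Int × Int)) : Int × Int :=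
  let p_0 := PySem.List.pyGetD points 0 (0, 0)
  (PySem.List.pyRange 1 (points.length : Int) 1).foldl
    (fun p_0 i =>
      let pi := PySem.List.pyGetD points i (0, 0)
      if pi.2 < p_0.2 then pi
      else if pi.2 = p_0.2 ∧ pi.1 < p_0.1 then pi
      else p_0)
    p_0

-- ===== PORT B =====
-- Literal port of B: sorted(points, key=lambda p: (p[1], p[0]))[0]
def find_p_0_alt (points : List (Int × Int)) : Int × Int :=
  PySem.List.pyGetD (PySem.List.sorted2 points (fun p => p.2) (fun p => p.1)) 0 (0, 0)

-- ===== PRECONDITION & SPEC =====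
-- On the empty list both Pythons raise IndexError (points[0] resp. sorted(...)[0]); excluded.
def Pre_find_p_0 (points : List (Int × Int)) : Prop := points ≠ []
instance (points : List (Int × Int)) : Decidable (Pre_find_p_0 points) := by unfold Pre_find_p_0; infer_instance
def pvWitness_find_p_0 : (List (Int × Int)) := ([(1, 2), (0, 2), (3, -1)])

def Spec_find_p_0 (points : List (Int × Int)) (out : Int × Int) : Prop := out = find_p_0_alt points
instance (points : List (Int × Int)) (out : Int × Int) : Decidable (Spec_find_p_0 points out) := by unfold Spec_find_p_0; infer_instance

-- ===== CLAIM (what is proved, stated in full; the proofs are below) =====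
def Claim_equal_find_p_0 : Prop := ∀ (points : List (Int × Int)), Dom_find_p_0 points → Pre_find_p_0 points → Spec_find_p_0 points (find_p_0 points)

-- ===== LEMMAS AND PROOFS =====

-- The strict "before" test sorted2 uses on the key (y, x): lexicographic less-than.
def pvLexLt (a b : Int × Int) : Bool :=
  decide (a.2 < b.2) || (!decide (b.2 < a.2) && decide (a.1 < b.1))

lemma insertBy_ne_nil {α : Type} (before : α → α → Bool) (x : α) (l : List α) :
    PySem.List.insertBy before x l ≠ [] := by
  cases l
  · simp [PySem.List.insertBy]
  · simp only [PySem.List.insertBy]; split <;> simp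

lemma headD_insertBy {α : Type} (before : α → α → Bool) (x d : α) (l : List α) (h : l ≠ []) :
    (PySem.List.insertBy before x l).headD d = if before x (l.headD d) then x else l.headD d := by
  cases l with
  | nil => exact absurd rfl h
  | cons y ys => simp only [PySem.List.insertBy, List.headD_cons]; split <;> simp

-- Head of the insertion-sort fold = the keep-first running minimum.
lemma headD_foldl_insertBy (before : Int × Int → Int × Int → Bool) (d : Int × Int)
    (t : List (Int × Int)) (acc : List (Int × Int)) (h : acc ≠ []) :
    ((t.foldl (fun acc x => PySem.List.insertBy before x acc) acc).headD d)
      = t.foldl (fun p q => if before q p then q else p) (acc.headD d) := by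
  induction t generalizing acc with
  | nil => rfl
  | cons y ys ih =>
    simp only [List.foldl_cons]
    rw [ih _ (insertBy_ne_nil before y acc), headD_insertBy before y d acc h]

-- A's update step is exactly "keep the lexicographically smaller, first on ties".
lemma step_eq_lex (p q : Int × Int) :
    (if q.2 < p.2 then q else if q.2 = p.2 ∧ q.1 < p.1 then q else p)
      = if pvLexLt q p then q else p := by
  simp only [pvLexLt]
  split_ifs with h1 h2 h3 h3 <;> simp_all; omega

-- ===== VERDICT (by name: the statement is the Claim_ definition above) =====
theorem find_p_0_spec : Claim_equal_find_p_0 := by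
  intro points _ hpre
  unfold Spec_find_p_0 find_p_0 find_p_0_alt
  cases points with
  | nil => exact absurd rfl hpre
  | cons x t =>
    rw [PySem.List.foldl_pyRange_pyGetD' (x :: t) (0, 0)
          (fun p_0 pi =>
            if pi.2 < p_0.2 then pi
            else if pi.2 = p_0.2 ∧ pi.1 < p_0.1 then pi
            else p_0) _ (by norm_num)]
    simp only [PySem.List.pyGetD_zero_cons, Int.toNat_one, List.drop_succ_cons, List.drop_zero]
    have hs : PySem.List.sorted2 (x :: t) (fun p => p.2) (fun p => p.1)
        = (x :: t).foldl (fun acc y => PySem.List.insertBy pvLexLt y acc) [] := by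
      rfl
    rw [PySem.List.pyGetD_zero, hs]
    have hh : ∀ (l : List (Int × Int)), l.getD 0 (0, 0) = l.headD (0, 0) := by
      intro l; cases l <;> rfl
    rw [hh, List.foldl_cons,
        headD_foldl_insertBy pvLexLt (0, 0) t _ (insertBy_ne_nil pvLexLt x []),
        show (PySem.List.insertBy pvLexLt x ([] : List (Int × Int))).headD (0, 0) = x from rfl]
    have hf : (fun (p_0 pi : Int × Int) =>
        if pi.2 < p_0.2 then pi
        else if pi.2 = p_0.2 ∧ pi.1 < p_0.1 then pi
        else p_0)
        = fun p q => if pvLexLt q p then q else p := by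
      funext p q; exact step_eq_lex p q
    rw [hf]
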